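-- pv_equiv track=rewrite | github.com/JakeMartin-ICL/flex | shelf.py | get_comparator
-- ===== SOURCE A (Python) =====
-- comparators = ('=', '<', '>', '!')
--
-- def get_comparator(filter, curr):
--     comparator = ''
--     while True:
--         char = filter[curr]
--         if char in comparators:
--             comparator += filter[curr]
--             curr += 1
--         elif char.isspace():
--             curr += 1
--         else:
--             return (comparator, curr)
-- ===== SOURCE B (Python) =====
-- comparators = ('=', '<', '>', '!')
--
-- def get_comparator(filter, curr):
--     # two-pass: boundary scan first, then collect comparator chars afterwards
--     start = curr
--     while filter[curr] in comparators or filter[curr].isspace():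
--         curr += 1
--     return (''.join(filter[i] for i in range(start, curr) if filter[i] in comparators), curr)
-- ===== Notes on version B (the rewrite author's own statement) =====
-- stated objective: alternative
-- what changed: Replaced the single interleaved accumulate-while-scanning loop by two passes: a boundary scan that only advances the index past comparator/whitespace characters, followed by a join over range(start, curr) that collects exactly the comparator characters.
import Mathlib
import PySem

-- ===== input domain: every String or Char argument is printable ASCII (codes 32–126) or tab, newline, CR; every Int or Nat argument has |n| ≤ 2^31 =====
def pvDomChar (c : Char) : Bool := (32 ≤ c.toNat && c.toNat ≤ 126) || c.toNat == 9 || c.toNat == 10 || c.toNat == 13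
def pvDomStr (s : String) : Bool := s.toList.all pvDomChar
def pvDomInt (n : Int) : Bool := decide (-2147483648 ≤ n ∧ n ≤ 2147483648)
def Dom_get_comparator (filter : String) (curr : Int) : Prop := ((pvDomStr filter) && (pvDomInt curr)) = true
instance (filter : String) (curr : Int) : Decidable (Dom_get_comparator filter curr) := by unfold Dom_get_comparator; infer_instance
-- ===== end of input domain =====

-- B replaces A's single accumulate-while-scanning loop by a boundary scan followed by a
-- collection pass over the scanned index range (objective: alternative decomposition, same cost).

-- ===== PORT A =====
def comparatorsL : List Char := ['=', '<', '>', '!']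

-- A's 'while True' loop: fuel bounds the number of iterations (≤ 2·len+2 suffices on Pre_;
-- on fuel exhaustion / IndexError — both outside Pre_ — it returns the current state).
def loopA : Nat → List Char → List Char → Int → List Char × Int
  | 0, _, comp, curr => (comp, curr)
  | fuel+1, l, comp, curr =>
    match PySem.List.pyGet? l curr with
    | none => (comp, curr)      -- filter[curr] raises IndexError here (excluded by Pre_)
    | some ch =>
      if ch ∈ comparatorsL then loopA fuel l (comp ++ [ch]) (curr + 1)
      else if PySem.Chars.isspace ch then loopA fuel l comp (curr + 1)
      else (comp, curr)

def get_comparator (filter : String) (curr : Int) : String × Int :=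
  let l := filter.toList
  let r := loopA (2 * l.length + 2) l [] curr
  (String.ofList r.1, r.2)

-- ===== PORT B =====
-- B's boundary loop: advances curr while filter[curr] is a comparator or whitespace.
def loopB : Nat → List Char → Int → Int
  | 0, _, curr => curr
  | fuel+1, l, curr =>
    match PySem.List.pyGet? l curr with
    | none => curr              -- filter[curr] raises IndexError here (excluded by Pre_)
    | some ch =>
      if ch ∈ comparatorsL ∨ PySem.Chars.isspace ch then loopB fuel l (curr + 1) else curr

-- ''.join(filter[i] for i in range(start, curr) if filter[i] in comparators)
def collectB (l : List Char) (start stop : Int) : List Char :=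
  (PySem.List.pyRange start stop 1).filterMap (fun i =>
    match PySem.List.pyGet? l i with
    | some c => if c ∈ comparatorsL then some c else none
    | none => none)

def get_comparator_alt (filter : String) (curr : Int) : String × Int :=
  let l := filter.toList
  let stop := loopB (2 * l.length + 2) l curr
  (String.ofList (collectB l curr stop), stop)

-- ===== PRECONDITION & SPEC =====
def stopperChar (c : Char) : Bool := !(comparatorsL.contains c) && !(PySem.Chars.isspace c)

-- Pre_: exactly the inputs where Python A returns (no IndexError): the index is in range and the
-- scan (which for a negative start eventually wraps to index 0) meets a non-comparator,
-- non-whitespace character before running off the end.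
def Pre_get_comparator (filter : String) (curr : Int) : Prop :=
  -(filter.toList.length : Int) ≤ curr ∧ curr < (filter.toList.length : Int) ∧
    (if 0 ≤ curr then filter.toList.drop curr.toNat else filter.toList).any stopperChar = true
instance (filter : String) (curr : Int) : Decidable (Pre_get_comparator filter curr) := by
  unfold Pre_get_comparator; infer_instance

def pvWitness_get_comparator : String × Int := ("= a", 0)

def Spec_get_comparator (filter : String) (curr : Int) (out : String × Int) : Prop := out = get_comparator_alt filter curr
instance (filter : String) (curr : Int) (out : String × Int) : Decidable (Spec_get_comparator filter curr out) := by unfold Spec_get_comparator; infer_instance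

-- ===== CLAIM (what is proved, stated in full; the proofs are below) =====
def Claim_equal_get_comparator : Prop := ∀ (filter : String) (curr : Int), Dom_get_comparator filter curr → Pre_get_comparator filter curr → Spec_get_comparator filter curr (get_comparator filter curr)

-- ===== LEMMAS AND PROOFS =====

-- the boundary loop never moves the index backwards
theorem loopB_ge (fuel : Nat) (l : List Char) (curr : Int) : curr ≤ loopB fuel l curr := by
  induction fuel generalizing curr with
  | zero => simp [loopB]
  | succ n ih =>
    simp only [loopB]
    cases PySem.List.pyGet? l curr with
    | none => exact le_refl _
    | some ch =>
      by_cases h : ch ∈ comparatorsL ∨ PySem.Chars.isspace ch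
      · simp only [if_pos h]; exact le_trans (by omega) (ih (curr + 1))
      · simp only [if_neg h]; exact le_refl _

theorem collectB_empty (l : List Char) (a : Int) : collectB l a a = [] := by
  simp [collectB, PySem.List.pyRange_one_eq_nil (le_refl a)]

theorem collectB_cons (l : List Char) (a b : Int) (h : a < b) :
    collectB l a b = (match PySem.List.pyGet? l a with
      | some c => if c ∈ comparatorsL then some c else none
      | none => none).toList ++ collectB l (a + 1) b := by
  simp only [collectB, PySem.List.pyRange_one_cons h, List.filterMap_cons]
  cases PySem.List.pyGet? l a with
  | none => simp
  | some c => by_cases hc : c ∈ comparatorsL <;> simp [hc]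

-- A's interleaved loop equals the boundary loop plus post-hoc collection (same fuel)
theorem loopA_eq (fuel : Nat) (l : List Char) (comp : List Char) (curr : Int) :
    loopA fuel l comp curr = (comp ++ collectB l curr (loopB fuel l curr), loopB fuel l curr) := by
  induction fuel generalizing comp curr with
  | zero => simp [loopA, loopB, collectB_empty]
  | succ n ih =>
    simp only [loopA, loopB]
    cases hg : PySem.List.pyGet? l curr with
    | none => simp [collectB_empty]
    | some ch =>
      by_cases h1 : ch ∈ comparatorsL
      · have hcond : ch ∈ comparatorsL ∨ PySem.Chars.isspace ch := Or.inl h1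
        simp only [if_pos h1, if_pos hcond, ih]
        have hlt : curr < loopB n l (curr + 1) := lt_of_lt_of_le (by omega) (loopB_ge n l (curr + 1))
        rw [collectB_cons l curr _ hlt, hg]
        simp [h1]
      · by_cases h2 : PySem.Chars.isspace ch
        · have hcond : ch ∈ comparatorsL ∨ PySem.Chars.isspace ch := Or.inr h2
          simp only [if_neg h1, if_pos h2, if_pos hcond, ih]
          have hlt : curr < loopB n l (curr + 1) := lt_of_lt_of_le (by omega) (loopB_ge n l (curr + 1))
          rw [collectB_cons l curr _ hlt, hg]
          simp [h1]
        · have hcond : ¬(ch ∈ comparatorsL ∨ PySem.Chars.isspace ch) := by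
            intro h; rcases h with h | h <;> contradiction
          simp [if_neg h1, if_neg h2, if_neg hcond, collectB_empty]

-- ===== VERDICT (by name: the statement is the Claim_ definition above) =====
theorem get_comparator_spec : Claim_equal_get_comparator := by
  intro filter curr _ _
  unfold Spec_get_comparator get_comparator get_comparator_alt
  simp [loopA_eq]
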